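-- pv_equiv track=rewrite | github.com/sirichandana811/python-training | day 7/goldtheifrecurssion.py | func
-- ===== SOURCE A (Python) =====
-- def func(l):
--       if len(l)==1:
--         return l[0]
--       if len(l)==0:
--           return 0
--       if len(l)==2:
--           return max(l)
--       n1=func(l[2:])
--       n2=func(l[3:])
--       return max(n1+l[0],n2+l[1])
-- ===== SOURCE B (Python) =====
-- def func(l):
--     n = len(l)
--     if n == 0:
--         return 0
--     if n == 1:
--         return l[0]
--     a, b, c, prev = max(l[-2], l[-1]), l[-1], 0, l[-2]
--     for x in reversed(l[:-2]):
--         a, b, c, prev = max(b + x, c + prev), a, b, x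
--     return a
-- ===== Notes on version B (the rewrite author's own statement) =====
-- stated objective: faster
-- what changed: Replaces the exponential branching recursion over list suffixes with a single backward pass keeping three rolling suffix values (bottom-up DP in O(1) extra state); intended as asymptotically faster — a timing run saw A time out at n=64 where B returned, and 1.32x at the largest size both finished.
import Mathlib
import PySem

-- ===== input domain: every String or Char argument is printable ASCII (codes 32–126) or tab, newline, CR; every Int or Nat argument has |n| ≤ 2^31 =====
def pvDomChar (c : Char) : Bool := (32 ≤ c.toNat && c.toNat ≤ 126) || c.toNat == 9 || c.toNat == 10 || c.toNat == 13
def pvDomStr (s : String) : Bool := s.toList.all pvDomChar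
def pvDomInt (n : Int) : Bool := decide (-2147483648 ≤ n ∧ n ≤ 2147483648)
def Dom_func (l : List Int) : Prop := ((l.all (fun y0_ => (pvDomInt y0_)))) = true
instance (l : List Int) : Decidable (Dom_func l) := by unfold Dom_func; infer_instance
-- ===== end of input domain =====

-- B replaces A's exponential branching recursion over list suffixes with one linear
-- backward pass over the list carrying three rolling suffix values (objective: faster; the
-- timing run saw A time out at n=64 where B returned).

-- ===== PORT A =====
-- helpers cited by func's decreasing_by (l[2:] and l[3:] shrink the list)
theorem pv_slice_from_two (l : List Int) : PySem.List.slice l (some 2) none = l.drop 2 := by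
  have h : ((2 : Nat) : Int) = (2 : Int) := by norm_num
  rw [← h, PySem.List.slice_from_natCast]

theorem pv_slice_from_three (l : List Int) : PySem.List.slice l (some 3) none = l.drop 3 := by
  have h : ((3 : Nat) : Int) = (3 : Int) := by norm_num
  rw [← h, PySem.List.slice_from_natCast]

def func (l : List Int) : Int :=
  if l.length = 1 then (PySem.List.pyGet? l 0).getD 0
  else if l.length = 0 then 0
  else if l.length = 2 then (PySem.List.max? l (fun y => y)).getD 0
  else
    let n1 := func (PySem.List.slice l (some 2) none)
    let n2 := func (PySem.List.slice l (some 3) none)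
    max (n1 + (PySem.List.pyGet? l 0).getD 0) (n2 + (PySem.List.pyGet? l 1).getD 0)
termination_by l.length
decreasing_by
  · rw [pv_slice_from_two, List.length_drop]; omega
  · rw [pv_slice_from_three, List.length_drop]; omega

-- ===== PORT B =====
-- the loop body of Source B: state (a, b, c, prev), new state after reading x
def pvStep (s : Int × Int × Int × Int) (x : Int) : Int × Int × Int × Int :=
  (max (s.2.1 + x) (s.2.2.1 + s.2.2.2), s.1, s.2.1, x)

def func_alt (l : List Int) : Int :=
  let n := l.length
  if n = 0 then 0
  else if n = 1 then (PySem.List.pyGet? l 0).getD 0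
  else
    let init : Int × Int × Int × Int :=
      (max ((PySem.List.pyGet? l (-2)).getD 0) ((PySem.List.pyGet? l (-1)).getD 0),
       (PySem.List.pyGet? l (-1)).getD 0, 0, (PySem.List.pyGet? l (-2)).getD 0)
    let s := ((PySem.List.slice l none (some (-2))).reverse).foldl pvStep init
    s.1

-- ===== PRECONDITION & SPEC =====
def Spec_func (l : List Int) (out : Int) : Prop := out = func_alt l
instance (l : List Int) (out : Int) : Decidable (Spec_func l out) := by unfold Spec_func; infer_instance

-- ===== CLAIM (what is proved, stated in full; the proofs are below) =====
def Claim_equal_func : Prop := ∀ (l : List Int), Dom_func l → Spec_func l (func l)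

-- ===== LEMMAS AND PROOFS =====

-- the loop invariant state: the values of A on the current suffix and its tails, plus its head
def pvS (r : List Int) : Int × Int × Int × Int := (func r, func r.tail, func r.tail.tail, r.headI)

theorem func_rec (x u v : Int) (rest : List Int) :
    func (x :: u :: v :: rest) = max (func (v :: rest) + x) (func rest + u) := by
  rw [func]
  simp only [List.length_cons]
  rw [if_neg (by omega), if_neg (by omega), if_neg (by omega)]
  rw [pv_slice_from_two, pv_slice_from_three]
  simp only [PySem.List.pyGet?, PySem.List.pyIdx?, List.length_cons]
  have hc : (0:Int) ≤ (rest.length : Int) + 1 := by omega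
  have hc2 : (0:Int) ≤ (rest.length : Int) + 1 + 1 := by omega
  simp [hc, hc2]

theorem pvStep_S (x : Int) (r : List Int) (h : 2 ≤ r.length) :
    pvStep (pvS r) x = pvS (x :: r) := by
  match r, h with
  | u :: v :: rest, _ =>
    simp only [pvS, pvStep, List.tail_cons, List.headI_cons]
    rw [func_rec]

theorem pv_fold_inv : ∀ (p r : List Int), 2 ≤ r.length →
    p.foldl pvStep (pvS r) = pvS (p.reverse ++ r) := by
  intro p
  induction p with
  | nil => intro r h; simp
  | cons x p ih =>
    intro r h
    have h2 : 2 ≤ (x :: r).length := by simp; omega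
    simp only [List.foldl_cons, pvStep_S x r h, ih (x :: r) h2, List.reverse_cons,
      List.append_assoc, List.singleton_append]

theorem func_nil : func ([] : List Int) = 0 := by rw [func]; simp
theorem func_one (v : Int) : func [v] = v := by rw [func]; simp [PySem.List.pyGet?, PySem.List.pyIdx?]
theorem func_two (u v : Int) : func [u, v] = max u v := by
  rw [func]; simp [PySem.List.max?_id_cons]

theorem pv_two_split (l : List Int) (h : 2 ≤ l.length) : ∃ t u v, l = t ++ [u, v] := by
  rcases l.eq_nil_or_concat with rfl | ⟨t1, v, rfl⟩
  · simp at h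
  · rcases t1.eq_nil_or_concat with rfl | ⟨t, u, rfl⟩
    · simp at h
    · exact ⟨t, u, v, by simp⟩

-- ===== VERDICT (by name: the statement is the Claim_ definition above) =====
theorem func_spec : Claim_equal_func := by
  intro l _
  show func l = func_alt l
  by_cases h2 : 2 ≤ l.length
  · obtain ⟨t, u, v, rfl⟩ := pv_two_split l h2
    unfold func_alt
    rw [if_neg (by simp), if_neg (by simp)]
    have hlast : PySem.List.pyGet? (t ++ [u, v]) (-1) = some v := by
      rw [show t ++ [u, v] = (t ++ [u]) ++ [v] by simp]
      exact PySem.List.pyGet?_neg_one_append_singleton (t ++ [u]) v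
    have hlen : (t ++ [u, v]).length = t.length + 2 := by simp
    have hsnd : PySem.List.pyGet? (t ++ [u, v]) (-2) = some u := by
      rw [PySem.List.pyGet?_neg_ofNat _ 2 (by omega) (by omega), hlen]
      simp
    have hslice : PySem.List.slice (t ++ [u, v]) none (some (-2)) = t := by
      rw [show (-2 : Int) = -((2:Nat):Int) by norm_num,
         PySem.List.slice_to_neg_natCast (t ++ [u, v]) 2 (by omega), hlen]
      simp [List.take_left']
    rw [hlast, hsnd, hslice]
    have hinit : ((max u v, v, (0 : Int), u) : Int × Int × Int × Int) = pvS [u, v] := by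
      simp [pvS, func_nil, func_one, func_two]
    simp only [Option.getD_some, hinit, pv_fold_inv t.reverse [u, v] (by simp),
      List.reverse_reverse]
    rfl
  · interval_cases hl : l.length
    · rw [List.length_eq_zero_iff.mp hl]
      rw [func]; simp [func_alt]
    · obtain ⟨v, rfl⟩ := List.length_eq_one_iff.mp hl
      rw [func_one]; simp [func_alt, PySem.List.pyGet?, PySem.List.pyIdx?]
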